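-- pv_equiv track=rewrite | github.com/cgiuffr/autoschedule | asplos-eurosys-2025/display-schedule.py | get_column_blocks
-- ===== SOURCE A (Python) =====
-- def get_column_blocks(date_row, header_row, target_date):
--     col_blocks = []
--     current_block = []
--
--     for i in range(len(date_row)):
--         date_val = str(date_row[i]).strip()
--         header_val = str(header_row[i]).strip()
--
--         if header_val.lower() == "time":
--             if current_block:
--                 col_blocks.append(current_block)
--             current_block = [i]
--         elif current_block:
--             current_block.append(i)
--
--     if current_block:
--         col_blocks.append(current_block)
--
--     columns_to_keep = []
--     for block in col_blocks:
--         time_col = block[0]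
--         room_cols = block[1:]
--         if any(target_date in str(date_row[i]) for i in room_cols):
--             columns_to_keep.extend(block)
--
--     return sorted(set(columns_to_keep))
-- ===== SOURCE B (Python) =====
-- def get_column_blocks(date_row, header_row, target_date):
--     n = len(date_row)
--     # leader[i] = index of the nearest "time" column at or before i (None if none)
--     leader = []
--     last = None
--     for i in range(n):
--         if str(header_row[i]).strip().lower() == "time":
--             last = i
--         leader.append(last)
--     winners = {leader[i] for i in range(n)
--                if leader[i] is not None and leader[i] != i
--                and target_date in str(date_row[i])}
--     return [i for i in range(n) if leader[i] in winners]
-- ===== Notes on version B (the rewrite author's own statement) =====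
-- stated objective: alternative
-- what changed: B never builds blocks: it labels every column with its leader (the nearest 'time' column at or before it), collects the set of leaders witnessed by a matching room column, and emits the already-sorted filter of range(n) by leader membership, replacing A's block-accumulating loop, block list, extend and sorted(set(...)).
import Mathlib
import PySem

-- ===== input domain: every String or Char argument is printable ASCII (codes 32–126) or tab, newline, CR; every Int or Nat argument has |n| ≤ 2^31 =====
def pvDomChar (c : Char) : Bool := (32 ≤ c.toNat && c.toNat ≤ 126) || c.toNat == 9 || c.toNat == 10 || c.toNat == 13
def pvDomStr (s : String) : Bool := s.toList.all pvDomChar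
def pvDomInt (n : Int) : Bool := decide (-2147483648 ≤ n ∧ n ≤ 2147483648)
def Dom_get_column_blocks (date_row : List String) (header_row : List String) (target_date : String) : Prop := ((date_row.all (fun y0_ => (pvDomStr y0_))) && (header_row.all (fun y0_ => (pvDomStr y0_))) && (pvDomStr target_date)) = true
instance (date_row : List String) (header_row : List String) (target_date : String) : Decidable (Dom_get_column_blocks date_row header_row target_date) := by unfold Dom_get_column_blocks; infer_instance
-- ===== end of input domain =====

-- B never builds blocks: it labels each column with its nearest preceding 'time'
-- column (its leader), collects the leaders witnessed by a matching room column,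
-- and filters range(n) by leader membership; objective: alternative algorithm.

-- shared helpers: the two column predicates both programs evaluate
def pvIsTime (header_row : List String) (i : Nat) : Bool :=
  PySem.Str.lower (PySem.Str.strip (header_row.getD i "")) == "time"

def pvHit (date_row : List String) (target_date : String) (i : Nat) : Bool :=
  PySem.Str.isIn target_date (date_row.getD i "")

-- ===== PORT A =====
-- sorted(set(xs)) returned as ints — A's final line
def pvFinish (cols : List Nat) : List Int :=
  (PySem.List.sorted (PySem.Set.ofList cols) (fun x => x) false).map (fun i => (i : Int))

def get_column_blocks (date_row : List String) (header_row : List String) (target_date : String) : List Int :=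
  -- first loop: build col_blocks / current_block exactly as A does
  let st := (List.range date_row.length).foldl
    (fun (st : List (List Nat) × List Nat) (i : Nat) =>
      let col_blocks := st.1
      let current_block := st.2
      if pvIsTime header_row i then
        ((if current_block = [] then col_blocks else col_blocks ++ [current_block]), [i])
      else if current_block = [] then (col_blocks, current_block)
      else (col_blocks, current_block ++ [i]))
    ([], [])
  let col_blocks := if st.2 = [] then st.1 else st.1 ++ [st.2]
  -- second loop: keep blocks whose room columns (block[1:]) contain the date
  let columns_to_keep := col_blocks.foldl
    (fun (acc : List Nat) (block : List Nat) =>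
      let room_cols := block.drop 1
      if room_cols.any (pvHit date_row target_date) then acc ++ block else acc)
    []
  pvFinish columns_to_keep

-- ===== PORT B =====
def get_column_blocks_alt (date_row : List String) (header_row : List String) (target_date : String) : List Int :=
  let n := date_row.length
  -- leader[i] = nearest 'time' column at or before i (none if there is none yet)
  let leader := ((List.range n).foldl
    (fun (st : Option Nat × List (Option Nat)) (i : Nat) =>
      let last := if pvIsTime header_row i then some i else st.1
      (last, st.2 ++ [last]))
    (none, [])).2
  -- winners = {leader[i] : leader[i] is not None, leader[i] != i, target in date_row[i]}
  let winners : PySem.Set Nat := PySem.Set.ofList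
    (((List.range n).filter (fun i =>
        match leader.getD i none with
        | some l => decide (l ≠ i) && pvHit date_row target_date i
        | none => false)).filterMap (fun i => leader.getD i none))
  -- [i for i in range(n) if leader[i] in winners] ('None in winners' is always False)
  ((List.range n).filter (fun i =>
      match leader.getD i none with
      | some l => PySem.Set.contains winners l
      | none => false)).map (fun i => (i : Int))

-- ===== PRECONDITION & SPEC =====
-- A indexes header_row[i] for every i < len(date_row); when header_row is shorter it
-- raises IndexError, so those inputs are excluded.
def Pre_get_column_blocks (date_row : List String) (header_row : List String) (target_date : String) : Prop :=
  date_row.length ≤ header_row.length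
instance (date_row : List String) (header_row : List String) (target_date : String) : Decidable (Pre_get_column_blocks date_row header_row target_date) := by unfold Pre_get_column_blocks; infer_instance

def pvWitness_get_column_blocks : List String × List String × String :=
  (["day", "x 2024-01-01", "other"], ["Time", "R1", "R2"], "2024-01-01")

def Spec_get_column_blocks (date_row : List String) (header_row : List String) (target_date : String) (out : List Int) : Prop := out = get_column_blocks_alt date_row header_row target_date
instance (date_row : List String) (header_row : List String) (target_date : String) (out : List Int) : Decidable (Spec_get_column_blocks date_row header_row target_date out) := by unfold Spec_get_column_blocks; infer_instance

-- ===== CLAIM (what is proved, stated in full; the proofs are below) =====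
def Claim_equal_get_column_blocks : Prop := ∀ (date_row : List String) (header_row : List String) (target_date : String), Dom_get_column_blocks date_row header_row target_date → Pre_get_column_blocks date_row header_row target_date → Spec_get_column_blocks date_row header_row target_date (get_column_blocks date_row header_row target_date)

-- ===== LEMMAS AND PROOFS =====

-- the recursive description of A's first loop (blocks plus the final flush)
def pvCollect (hr : List String) (cur : List Nat) (idxs : List Nat) : List (List Nat) :=
  match idxs with
  | [] => if cur = [] then [] else [cur]
  | i :: rest =>
      if pvIsTime hr i then (if cur = [] then [] else [cur]) ++ pvCollect hr [i] rest
      else pvCollect hr (if cur = [] then cur else cur ++ [i]) rest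

def pvPairs (s : List Nat) (n : Nat) : List (Nat × Nat) := s.zip (s.tail ++ [n])

def pvStepA (hr : List String) (st : List (List Nat) × List Nat) (i : Nat) : List (List Nat) × List Nat :=
  if pvIsTime hr i then
    ((if st.2 = [] then st.1 else st.1 ++ [st.2]), [i])
  else if st.2 = [] then (st.1, st.2)
  else (st.1, st.2 ++ [i])

theorem pvFoldA_collect (hr : List String) (idxs : List Nat) :
    ∀ (blocks : List (List Nat)) (cur : List Nat),
      (let st := idxs.foldl (pvStepA hr) (blocks, cur)
       if st.2 = [] then st.1 else st.1 ++ [st.2]) = blocks ++ pvCollect hr cur idxs := by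
  induction idxs with
  | nil =>
      intro blocks cur
      simp only [List.foldl_nil, pvCollect]
      split <;> simp
  | cons i rest ih =>
      intro blocks cur
      simp only [List.foldl_cons, pvCollect, pvStepA]
      by_cases ht : pvIsTime hr i
      · simp only [ht, if_pos]
        rw [ih]
        by_cases hc : cur = [] <;> simp [hc]
      · simp only [ht, Bool.false_eq_true]
        by_cases hc : cur = [] <;> simp only [hc] <;> simp [ih]

theorem pvPairs_cons (x y : Nat) (t : List Nat) (n : Nat) :
    pvPairs (x :: y :: t) n = (x, y) :: pvPairs (y :: t) n := rfl

-- inside a block that starts at s, pvCollect reads off exactly the boundary ranges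
theorem pvCollect_range' (hr : List String) (k : Nat) :
    ∀ (a c s : Nat), 1 ≤ c → s + c = a →
      pvCollect hr (List.range' s c) (List.range' a k)
        = (pvPairs (s :: (List.range' a k).filter (pvIsTime hr)) (a + k)).map
            (fun p => List.range' p.1 (p.2 - p.1)) := by
  induction k with
  | zero =>
      intro a c s hc hs
      have hne : List.range' s c ≠ [] := by simp [List.range'_eq_nil_iff]; omega
      have h2 : a + 0 - s = c := by omega
      simp only [List.range'_zero, pvCollect, if_neg hne, pvPairs, List.filter_nil,
        List.tail_cons, List.nil_append, List.zip_cons_cons, List.zip_nil_right,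
        List.map_cons, List.map_nil, h2]
  | succ k ih =>
      intro a c s hc hs
      rw [List.range'_succ]
      have hne : List.range' s c ≠ [] := by simp [List.range'_eq_nil_iff]; omega
      by_cases ht : pvIsTime hr a
      · rw [List.filter_cons_of_pos ht, pvPairs_cons]
        simp only [pvCollect, ht, if_true, if_neg hne, List.map_cons]
        have h1 : [a] = List.range' a 1 := by simp
        rw [h1, ih (a + 1) 1 a (by omega) (by omega)]
        have e1 : a - s = c := by omega
        have e2 : a + 1 + k = a + (k + 1) := by omega
        rw [e1, e2]
        simp
      · rw [List.filter_cons_of_neg (by simp [ht])]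
        simp only [pvCollect, ht, Bool.false_eq_true, if_false, if_neg hne]
        have hcat : List.range' s c ++ [a] = List.range' s (c + 1) := by
          have ha : a = s + c := by omega
          subst ha
          exact List.range'_1_concat.symm
        rw [hcat, ih (a + 1) (c + 1) s (by omega) (by omega)]
        have e2 : a + 1 + k = a + (k + 1) := by omega
        rw [e2]

-- before the first 'time' column pvCollect just skips, giving the full boundary description
theorem pvCollect_nil_range' (hr : List String) (k : Nat) :
    ∀ (a : Nat),
      pvCollect hr [] (List.range' a k)
        = (pvPairs ((List.range' a k).filter (pvIsTime hr)) (a + k)).map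
            (fun p => List.range' p.1 (p.2 - p.1)) := by
  induction k with
  | zero => intro a; simp [pvCollect, pvPairs]
  | succ k ih =>
      intro a
      rw [List.range'_succ]
      by_cases ht : pvIsTime hr a
      · rw [List.filter_cons_of_pos ht]
        simp only [pvCollect, ht, if_true, List.nil_append]
        have h1 : [a] = List.range' a 1 := by simp
        rw [h1, pvCollect_range' hr k (a + 1) 1 a (by omega) (by omega)]
        have e2 : a + 1 + k = a + (k + 1) := by omega
        rw [e2]
      · rw [List.filter_cons_of_neg (by simp [ht])]
        simp only [pvCollect, ht, Bool.false_eq_true, if_false, reduceIte]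
        rw [ih (a + 1)]
        have e2 : a + 1 + k = a + (k + 1) := by omega
        rw [e2]

theorem pvDrop_range' (a m : Nat) : (List.range' a m).drop 1 = List.range' (a + 1) (m - 1) := by
  cases m with
  | zero => simp
  | succ m => rw [List.range'_succ]; simp

-- A's keep list, closed form: flatMap over consecutive boundary pairs
def pvKeep (dr hr : List String) (td : String) : List Nat :=
  (pvPairs ((List.range dr.length).filter (pvIsTime hr)) dr.length).flatMap
    (fun p => if (List.range' (p.1 + 1) (p.2 - (p.1 + 1))).any (pvHit dr td)
              then List.range' p.1 (p.2 - p.1) else [])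

theorem get_column_blocks_eq_finish_keep (dr hr : List String) (td : String) :
    get_column_blocks dr hr td = pvFinish (pvKeep dr hr td) := by
  unfold get_column_blocks pvKeep
  simp only []
  refine congrArg pvFinish ?_
  have hfold : (List.range dr.length).foldl
      (fun (st : List (List Nat) × List Nat) (i : Nat) =>
        let col_blocks := st.1
        let current_block := st.2
        if pvIsTime hr i then
          ((if current_block = [] then col_blocks else col_blocks ++ [current_block]), [i])
        else if current_block = [] then (col_blocks, current_block)
        else (col_blocks, current_block ++ [i])) ([], [])
      = (List.range dr.length).foldl (pvStepA hr) ([], []) := rfl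
  rw [hfold]
  have h1 := pvFoldA_collect hr (List.range dr.length) [] []
  simp only [List.nil_append] at h1
  rw [h1, List.range_eq_range', pvCollect_nil_range' hr dr.length 0]
  simp only [Nat.zero_add, List.foldl_map]
  rw [show (fun (acc : List Nat) (p : Nat × Nat) =>
        let block := List.range' p.1 (p.2 - p.1)
        let room_cols := block.drop 1
        if room_cols.any (pvHit dr td) then acc ++ block else acc)
      = (fun acc p => acc ++ (if ((List.range' p.1 (p.2 - p.1)).drop 1).any (pvHit dr td)
          then List.range' p.1 (p.2 - p.1) else [])) from by
        funext acc p
        by_cases h : (List.drop 1 (List.range' p.1 (p.2 - p.1))).any (pvHit dr td) = true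
        · rw [if_pos h, if_pos h]
        · rw [if_neg h, if_neg h, List.append_nil]]
  rw [PySem.List.foldl_append_eq_flatMap]
  simp only [List.nil_append]
  apply List.flatMap_congr  -- placeholder; fixed below if name differs
  intro p _
  rw [pvDrop_range']
  have hsub : p.2 - p.1 - 1 = p.2 - (p.1 + 1) := by omega
  rw [hsub]

-- ---- leader function and its fold characterization ----
def pvLead (hr : List String) : Nat → Option Nat
  | 0 => if pvIsTime hr 0 then some 0 else none
  | (i+1) => if pvIsTime hr (i+1) then some (i+1) else pvLead hr i

def pvLast (hr : List String) : Nat → Option Nat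
  | 0 => none
  | (i+1) => pvLead hr i

theorem pvLeadFold (hr : List String) (n : Nat) :
    (List.range n).foldl
      (fun (st : Option Nat × List (Option Nat)) (i : Nat) =>
        let last := if pvIsTime hr i then some i else st.1
        (last, st.2 ++ [last]))
      (none, [])
    = (pvLast hr n, (List.range n).map (pvLead hr)) := by
  induction n with
  | zero => simp [pvLast]
  | succ n ih =>
      rw [List.range_succ, List.foldl_append, ih]
      simp only [List.foldl_cons, List.foldl_nil, List.map_append, List.map_cons, List.map_nil]
      cases n with
      | zero => simp [pvLast, pvLead]
      | succ m =>
          simp only [pvLast, pvLead]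

theorem pvLeaderGetD (hr : List String) (n i : Nat) (hi : i < n) :
    ((List.range n).map (pvLead hr)).getD i none = pvLead hr i := by
  rw [List.getD_eq_getElem?_getD, List.getElem?_map, List.getElem?_range hi]
  rfl

-- spec of pvLead: the nearest time column at or before k
theorem pvLead_some (hr : List String) :
    ∀ k l, pvLead hr k = some l →
      l ≤ k ∧ pvIsTime hr l = true ∧ ∀ j, l < j → j ≤ k → pvIsTime hr j = false := by
  intro k
  induction k with
  | zero =>
      intro l h
      by_cases ht : pvIsTime hr 0 <;> simp [pvLead, ht] at h
      subst h; exact ⟨le_refl _, ht, by omega⟩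
  | succ k ih =>
      intro l h
      by_cases ht : pvIsTime hr (k+1)
      · simp [pvLead, ht] at h
        subst h; exact ⟨le_refl _, ht, by omega⟩
      · simp only [pvLead, ht, Bool.false_eq_true, if_false] at h
        obtain ⟨h1, h2, h3⟩ := ih l h
        refine ⟨by omega, h2, ?_⟩
        intro j hj1 hj2
        by_cases hje : j = k + 1
        · subst hje; simpa using ht
        · exact h3 j hj1 (by omega)

theorem pvLead_of (hr : List String) :
    ∀ k l, l ≤ k → pvIsTime hr l = true →
      (∀ j, l < j → j ≤ k → pvIsTime hr j = false) → pvLead hr k = some l := by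
  intro k
  induction k with
  | zero =>
      intro l h1 h2 _
      have : l = 0 := by omega
      subst this
      simp [pvLead, h2]
  | succ k ih =>
      intro l h1 h2 h3
      by_cases hle : l = k + 1
      · subst hle; simp [pvLead, h2]
      · have ht : pvIsTime hr (k+1) = false := h3 (k+1) (by omega) (le_refl _)
        simp only [pvLead, ht, Bool.false_eq_true, if_false]
        exact ih l (by omega) h2 (fun j a b => h3 j a (by omega))

-- ---- geometry of the boundary pairs ----
theorem pvPairs_map_fst (s : List Nat) (n : Nat) : (pvPairs s n).map Prod.fst = s := by
  unfold pvPairs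
  rw [List.map_fst_zip]
  simp [List.length_tail]
  cases s <;> simp

theorem pvPairs_struct (n : Nat) :
    ∀ (s : List Nat), s.Pairwise (· < ·) → (∀ x ∈ s, x < n) →
      ∀ p ∈ pvPairs s n, p.1 < p.2 ∧ p.2 ≤ n ∧ (p.2 = n ∨ p.2 ∈ s) ∧
        (∀ q, p.1 < q → q < p.2 → q ∉ s) := by
  intro s
  induction s with
  | nil => intro _ _ p hp; simp [pvPairs] at hp
  | cons a t ih =>
      intro hpw hlt p hp
      cases t with
      | nil =>
          simp [pvPairs] at hp
          subst hp
          refine ⟨by simpa using hlt a (by simp), le_refl _, Or.inl rfl, ?_⟩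
          intro q h1 _ hq
          simp at hq
          omega
      | cons b t2 =>
          rw [pvPairs_cons] at hp
          rcases List.mem_cons.mp hp with h | h
          · subst h
            have hab : a < b := by
              have := List.pairwise_cons.mp hpw
              exact this.1 b (by simp)
            refine ⟨hab, le_of_lt (hlt b (by simp)), Or.inr (by simp), ?_⟩
            intro q h1 h2 hq
            rcases List.mem_cons.mp hq with rfl | hq2
            · omega
            · have := List.pairwise_cons.mp hpw
              have hb := this.1 q hq2
              rcases List.mem_cons.mp hq2 with rfl | hq3
              · omega
              · have := (List.pairwise_cons.mp this.2).1 q hq3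
                omega
          · have hpw2 := List.pairwise_cons.mp hpw
            obtain ⟨h1, h2, h4, h3⟩ := ih hpw2.2 (fun x hx => hlt x (List.mem_cons_of_mem a hx)) p h
            refine ⟨h1, h2, ?_, ?_⟩
            · rcases h4 with h4 | h4
              · exact Or.inl h4
              · exact Or.inr (List.mem_cons_of_mem a h4)
            intro q hq1 hq2 hq
            rcases List.mem_cons.mp hq with rfl | hq3
            · -- q = a: a < p.1 impossible since a is the least
              have hp1 : p.1 ∈ b :: t2 := by
                have : p.1 ∈ (pvPairs (b :: t2) n).map Prod.fst := List.mem_map_of_mem h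
                rwa [pvPairs_map_fst] at this
              have := hpw2.1 p.1 hp1
              omega
            · exact h3 q hq1 hq2 hq3

theorem pvPairs_cover (s : List Nat) (n : Nat) (l : Nat) (hl : l ∈ s) :
    ∃ p ∈ pvPairs s n, p.1 = l := by
  have : l ∈ (pvPairs s n).map Prod.fst := by rw [pvPairs_map_fst]; exact hl
  obtain ⟨p, hp, he⟩ := List.mem_map.mp this
  exact ⟨p, hp, he⟩

-- ===== the main bridge =====

-- winning leaders, written with pvLead directly
def pvW (dr hr : List String) (td : String) : List Nat :=
  ((List.range dr.length).filter (fun i =>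
      match pvLead hr i with
      | some l => decide (l ≠ i) && pvHit dr td i
      | none => false)).filterMap (fun i => pvLead hr i)

def pvQ (dr hr : List String) (td : String) (i : Nat) : Bool :=
  match pvLead hr i with
  | some l => PySem.Set.contains (PySem.Set.ofList (pvW dr hr td)) l
  | none => false

theorem pv_contains_ofList (W : List Nat) (l : Nat) :
    PySem.Set.contains (PySem.Set.ofList W) l = true ↔ l ∈ W := by
  have h : PySem.Set.contains (PySem.Set.ofList W) l = true ↔ l ∈ PySem.Set.ofList W := by
    simp [PySem.Set.contains]
  rw [h, PySem.Set.mem_ofList]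

theorem pvW_mem (dr hr : List String) (td : String) (l : Nat) :
    l ∈ pvW dr hr td
      ↔ ∃ j, j < dr.length ∧ pvLead hr j = some l ∧ l ≠ j ∧ pvHit dr td j = true := by
  unfold pvW
  rw [List.mem_filterMap]
  constructor
  · rintro ⟨j, hj, hl⟩
    rw [List.mem_filter, List.mem_range] at hj
    obtain ⟨hj1, hj2⟩ := hj
    rw [hl] at hj2
    simp only [Bool.and_eq_true, decide_eq_true_eq] at hj2
    exact ⟨j, hj1, hl, hj2.1, hj2.2⟩
  · rintro ⟨j, h1, h2, h3, h4⟩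
    refine ⟨j, ?_, h2⟩
    rw [List.mem_filter, List.mem_range]
    refine ⟨h1, ?_⟩
    rw [h2]
    simp [h3, h4]

theorem pvQ_true (dr hr : List String) (td : String) (k : Nat) :
    pvQ dr hr td k = true ↔ ∃ l, pvLead hr k = some l ∧ l ∈ pvW dr hr td := by
  unfold pvQ
  cases h : pvLead hr k with
  | none => simp
  | some l =>
      rw [pv_contains_ofList]
      constructor
      · intro hw; exact ⟨l, rfl, hw⟩
      · rintro ⟨l', hl', hw⟩
        cases hl'
        exact hw

theorem pvKeep_mem (dr hr : List String) (td : String) (k : Nat) :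
    k ∈ pvKeep dr hr td ↔ k < dr.length ∧ pvQ dr hr td k = true := by
  have hs_pw : ((List.range dr.length).filter (pvIsTime hr)).Pairwise (· < ·) :=
    List.pairwise_lt_range.filter _
  have hs_lt : ∀ x ∈ (List.range dr.length).filter (pvIsTime hr), x < dr.length :=
    fun x hx => List.mem_range.mp (List.mem_filter.mp hx).1
  have hs_isT : ∀ x ∈ (List.range dr.length).filter (pvIsTime hr), pvIsTime hr x = true :=
    fun x hx => (List.mem_filter.mp hx).2
  have hs_mem : ∀ x, x < dr.length → pvIsTime hr x = true →
      x ∈ (List.range dr.length).filter (pvIsTime hr) :=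
    fun x h1 h2 => List.mem_filter.mpr ⟨List.mem_range.mpr h1, h2⟩
  have struct := pvPairs_struct dr.length ((List.range dr.length).filter (pvIsTime hr)) hs_pw hs_lt
  -- inside a pair's range the leader is the pair's first component
  have hlead_blk : ∀ p ∈ pvPairs ((List.range dr.length).filter (pvIsTime hr)) dr.length,
      ∀ m, p.1 ≤ m → m < p.2 → pvLead hr m = some p.1 := by
    intro p hp m h1 h2
    obtain ⟨hlt, hle, _, hgap⟩ := struct p hp
    have hfst : p.1 ∈ (List.range dr.length).filter (pvIsTime hr) := by
      rw [← pvPairs_map_fst ((List.range dr.length).filter (pvIsTime hr)) dr.length]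
      exact List.mem_map_of_mem hp
    apply pvLead_of hr m p.1 h1 (hs_isT _ hfst)
    intro j hj1 hj2
    cases hbj : pvIsTime hr j with
    | false => rfl
    | true =>
        exfalso
        exact hgap j hj1 (lt_of_le_of_lt hj2 h2) (hs_mem j (by omega) hbj)
  -- a leader value determines a covering pair
  have hlead_pair : ∀ m l, m < dr.length → pvLead hr m = some l →
      ∃ p ∈ pvPairs ((List.range dr.length).filter (pvIsTime hr)) dr.length,
        p.1 = l ∧ l ≤ m ∧ m < p.2 := by
    intro m l hm hlm
    obtain ⟨hle, hT, hgap⟩ := pvLead_some hr m l hlm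
    have hls : l ∈ (List.range dr.length).filter (pvIsTime hr) :=
      hs_mem l (lt_of_le_of_lt hle hm) hT
    obtain ⟨p, hp, hpe⟩ := pvPairs_cover _ dr.length l hls
    refine ⟨p, hp, hpe, hle, ?_⟩
    by_contra hcon
    push_neg at hcon
    obtain ⟨hlt, hle2, hend, _⟩ := struct p hp
    rcases hend with he | hes
    · omega
    · have hfalse := hgap p.2 (by omega) hcon
      rw [hs_isT _ hes] at hfalse
      exact Bool.noConfusion hfalse
  unfold pvKeep
  rw [List.mem_flatMap]
  constructor
  · rintro ⟨p, hp, hk⟩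
    obtain ⟨hlt, hle2, _, _⟩ := struct p hp
    by_cases hc : (List.range' (p.1 + 1) (p.2 - (p.1 + 1))).any (pvHit dr td) = true
    · rw [if_pos hc] at hk
      rw [List.mem_range'_1] at hk
      have hk2 : k < p.2 := by omega
      refine ⟨lt_of_lt_of_le hk2 hle2, ?_⟩
      rw [pvQ_true]
      refine ⟨p.1, hlead_blk p hp k hk.1 hk2, ?_⟩
      obtain ⟨j, hjmem, hjhit⟩ := List.any_eq_true.mp hc
      rw [List.mem_range'_1] at hjmem
      have hj2 : j < p.2 := by omega
      rw [pvW_mem]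
      exact ⟨j, lt_of_lt_of_le hj2 hle2,
        hlead_blk p hp j (by omega) hj2, by omega, hjhit⟩
    · rw [if_neg hc] at hk
      exact absurd hk (List.not_mem_nil)
  · rintro ⟨hkn, hQ⟩
    rw [pvQ_true] at hQ
    obtain ⟨l, hl, hlW⟩ := hQ
    rw [pvW_mem] at hlW
    obtain ⟨j, hj1, hj2, hj3, hj4⟩ := hlW
    obtain ⟨p, hp, hpe, hle, hlt2⟩ := hlead_pair k l hkn hl
    obtain ⟨hplt, hple, hpend, _⟩ := struct p hp
    obtain ⟨hjle, _, hjgap⟩ := pvLead_some hr j l hj2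
    have hjlt : j < p.2 := by
      by_contra hcon
      push_neg at hcon
      rcases hpend with he | hes
      · omega
      · have hfalse := hjgap p.2 (by omega) hcon
        rw [hs_isT _ hes] at hfalse
        exact Bool.noConfusion hfalse
    refine ⟨p, hp, ?_⟩
    have hany : (List.range' (p.1 + 1) (p.2 - (p.1 + 1))).any (pvHit dr td) = true :=
      List.any_eq_true.mpr ⟨j, List.mem_range'_1.mpr ⟨by omega, by omega⟩, hj4⟩
    rw [if_pos hany]
    exact List.mem_range'_1.mpr ⟨by omega, by omega⟩

theorem pv_main (dr hr : List String) (td : String) :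
    pvFinish (pvKeep dr hr td)
      = ((List.range dr.length).filter (fun i =>
          match ((List.range dr.length).map (pvLead hr)).getD i none with
          | some l => PySem.Set.contains (PySem.Set.ofList
              (((List.range dr.length).filter (fun i =>
                  match ((List.range dr.length).map (pvLead hr)).getD i none with
                  | some l => decide (l ≠ i) && pvHit dr td i
                  | none => false)).filterMap (fun i => ((List.range dr.length).map (pvLead hr)).getD i none))) l
          | none => false)).map (fun i => (i : Int)) := by
  have hgd : ∀ i ∈ List.range dr.length,
      ((List.range dr.length).map (pvLead hr)).getD i none = pvLead hr i :=
    fun i hi => pvLeaderGetD hr _ i (List.mem_range.mp hi)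
  have hWeq : ((List.range dr.length).filter (fun i =>
      match ((List.range dr.length).map (pvLead hr)).getD i none with
      | some l => decide (l ≠ i) && pvHit dr td i
      | none => false)).filterMap (fun i => ((List.range dr.length).map (pvLead hr)).getD i none)
      = pvW dr hr td := by
    unfold pvW
    have h1 : (List.range dr.length).filter (fun i =>
        match ((List.range dr.length).map (pvLead hr)).getD i none with
        | some l => decide (l ≠ i) && pvHit dr td i
        | none => false)
        = (List.range dr.length).filter (fun i =>
        match pvLead hr i with
        | some l => decide (l ≠ i) && pvHit dr td i
        | none => false) :=
      List.filter_congr (fun i hi => by rw [hgd i hi])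
    rw [h1]
    exact List.filterMap_congr (fun i hi => hgd i (List.mem_filter.mp hi).1)
  have h2 : (List.range dr.length).filter (fun i =>
      match ((List.range dr.length).map (pvLead hr)).getD i none with
      | some l => PySem.Set.contains (PySem.Set.ofList
          (((List.range dr.length).filter (fun i =>
              match ((List.range dr.length).map (pvLead hr)).getD i none with
              | some l => decide (l ≠ i) && pvHit dr td i
              | none => false)).filterMap (fun i => ((List.range dr.length).map (pvLead hr)).getD i none))) l
      | none => false)
      = (List.range dr.length).filter (pvQ dr hr td) := by
    apply List.filter_congr
    intro i hi
    rw [hgd i hi, hWeq]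
    rfl
  rw [h2]
  unfold pvFinish
  have hfilter_pw : ((List.range dr.length).filter (pvQ dr hr td)).Pairwise
      (fun a b => (fun x => x) a < (fun x => x) b) :=
    List.pairwise_lt_range.filter _
  have hfilter_nd : ((List.range dr.length).filter (pvQ dr hr td)).Nodup :=
    hfilter_pw.imp (fun h => Nat.ne_of_lt h)
  have hperm : ((List.range dr.length).filter (pvQ dr hr td)).Perm
      (PySem.Set.ofList (pvKeep dr hr td)) := by
    rw [List.perm_ext_iff_of_nodup hfilter_nd (PySem.Set.nodup_ofList _)]
    intro a
    rw [PySem.Set.mem_ofList, pvKeep_mem, List.mem_filter, List.mem_range]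
  rw [PySem.List.sorted_eq_of_perm_of_pairwise_lt _ _ _ hperm hfilter_pw]

-- ===== VERDICT (by name: the statement is the Claim_ definition above) =====
theorem get_column_blocks_spec : Claim_equal_get_column_blocks := by
  intro dr hr td _ _
  show _ = _
  rw [get_column_blocks_eq_finish_keep, pv_main]
  unfold get_column_blocks_alt
  simp only [pvLeadFold]
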